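-- pv_equiv track=rewrite | github.com/zeniverse/-algorithm-practice | Programmers/Level2/더 맵게(2).py | solution
-- ===== SOURCE A (Python) =====
-- import heapq
--
-- def solution(scoville, K):
--
--     heapq.heapify(scoville)
--     count = 0
--
--     while True:
--         num1 = heapq.heappop(scoville)
--
--         if num1 >= K:
--             break
--
--         if len(scoville) == 0:
--             return -1
--
--         num2 = heapq.heappop(scoville)
--
--         heapq.heappush(scoville, num1 + (num2 * 2))
--         count += 1
--
--     return count
-- ===== SOURCE B (Python) =====
-- def solution(scoville, K):
--     # Heap-free re-implementation: repeatedly scan for the two smallest values.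
--     # Like A, this mutates the argument list (equivalence is about the return value).
--     count = 0
--     while True:
--         num1 = min(scoville)
--         if num1 >= K:
--             return count
--         if len(scoville) < 2:
--             return -1
--         scoville.remove(num1)
--         num2 = min(scoville)
--         scoville.remove(num2)
--         scoville.append(num1 + num2 * 2)
--         count += 1
-- ===== Notes on version B (the rewrite author's own statement) =====
-- stated objective: simpler
-- what changed: B drops the binary heap (heapq) entirely and instead rescans the plain list each round with min() and list.remove(), mixing the two smallest values until the minimum reaches K.
-- outside the precondition, e.g. on solution([], 5): A raises IndexError, B raises ValueError
import Mathlib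
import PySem

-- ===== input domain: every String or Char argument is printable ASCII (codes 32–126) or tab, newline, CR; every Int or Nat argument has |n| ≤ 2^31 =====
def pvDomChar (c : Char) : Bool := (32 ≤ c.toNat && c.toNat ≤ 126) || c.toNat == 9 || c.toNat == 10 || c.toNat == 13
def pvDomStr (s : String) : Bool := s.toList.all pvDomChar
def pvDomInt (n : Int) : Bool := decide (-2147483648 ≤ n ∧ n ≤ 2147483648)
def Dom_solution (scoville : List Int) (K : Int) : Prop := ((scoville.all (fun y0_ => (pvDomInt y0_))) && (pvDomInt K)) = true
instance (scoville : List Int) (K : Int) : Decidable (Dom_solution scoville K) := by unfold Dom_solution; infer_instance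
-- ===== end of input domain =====

-- B replaces A's binary heap (heapq) by plain min-scans over the list; equivalence is about
-- the return value only (both Pythons mutate the argument list in place).

-- ===== PORT A =====
-- A calls Python's heapq; heapify/heappop/heappush below transliterate CPython's heapq
-- (with its helpers _siftdown and _siftup) on a List Int, reads l[i] as getD (indices in range).
def hGet (l : List Int) (i : Nat) : Int := l.getD i 0

-- _siftdown(heap, startpos, pos): the while-loop (heap and pos are the mutable state;
-- newitem = heap[pos] was read before the loop, the final write heap[pos] = newitem is in siftdown)
def siftdownLoop (newitem : Int) (heap : List Int) (startpos pos : Nat) : List Int × Nat :=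
  if startpos < pos then
    let parentpos := (pos - 1) / 2
    let parent := hGet heap parentpos
    if newitem < parent then
      siftdownLoop newitem (heap.set pos parent) startpos parentpos
    else (heap, pos)
  else (heap, pos)
termination_by pos
decreasing_by omega

def siftdown (heap : List Int) (startpos pos : Nat) : List Int :=
  let newitem := hGet heap pos
  let r := siftdownLoop newitem heap startpos pos
  r.1.set r.2 newitem

-- _siftup(heap, pos): the while-loop moving the smaller child up until a leaf
def siftupLoop (heap : List Int) (pos : Nat) : List Int × Nat :=
  let endpos := heap.length
  let childpos := 2 * pos + 1
  if _h : childpos < endpos then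
    let rightpos := childpos + 1
    let childpos2 := if rightpos < endpos ∧ ¬ hGet heap childpos < hGet heap rightpos then rightpos else childpos
    siftupLoop (heap.set pos (hGet heap childpos2)) childpos2
  else (heap, pos)
termination_by heap.length - pos
decreasing_by simp only [List.length_set]; split at * <;> omega

def siftup (heap : List Int) (pos : Nat) : List Int :=
  let startpos := pos
  let newitem := hGet heap pos
  let r := siftupLoop heap pos
  siftdown (r.1.set r.2 newitem) startpos r.2

-- heapq.heapify(x): for i in reversed(range(n//2)): _siftup(x, i)
def heapify (x : List Int) : List Int :=
  (List.range (x.length / 2)).reverse.foldl (fun h i => siftup h i) x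

-- heapq.heappush: heap.append(item); _siftdown(heap, 0, len(heap)-1)
def heappush (heap : List Int) (item : Int) : List Int :=
  siftdown (heap ++ [item]) 0 heap.length

-- heapq.heappop: lastelt = heap.pop() (IndexError on [] — excluded by Pre_solution);
-- if heap: returnitem = heap[0]; heap[0] = lastelt; _siftup(heap, 0); return returnitem
def heappop (heap : List Int) : Int × List Int :=
  let lastelt := heap.getLastD 0
  let rest := heap.dropLast
  if rest.isEmpty then (lastelt, rest)
  else
    let returnitem := hGet rest 0
    (returnitem, siftup (rest.set 0 lastelt) 0)

-- the while True loop of A; fuel = initial length (each iteration shrinks the heap by one)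
def solutionLoopA (K : Int) (fuel : Nat) (heap : List Int) (count : Int) : Int :=
  match fuel with
  | 0 => count
  | f + 1 =>
    let p := heappop heap
    if p.1 ≥ K then count
    else if p.2.length = 0 then -1
    else
      let q := heappop p.2
      solutionLoopA K f (heappush q.2 (p.1 + q.1 * 2)) (count + 1)

def solution (scoville : List Int) (K : Int) : Int :=
  solutionLoopA K scoville.length (heapify scoville) 0

-- ===== PORT B =====
-- the while True loop of B; fuel = initial length (each iteration shrinks the list by one)
def solutionLoopB (K : Int) (fuel : Nat) (s : List Int) (count : Int) : Int :=
  match fuel with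
  | 0 => count
  | f + 1 =>
    let num1 := (PySem.List.min? s (fun x => x)).getD 0
    if num1 ≥ K then count
    else if s.length < 2 then -1
    else
      let s1 := (PySem.List.remove? s num1).getD []
      let num2 := (PySem.List.min? s1 (fun x => x)).getD 0
      let s2 := (PySem.List.remove? s1 num2).getD []
      solutionLoopB K f (s2 ++ [num1 + num2 * 2]) (count + 1)

def solution_alt (scoville : List Int) (K : Int) : Int :=
  solutionLoopB K scoville.length scoville 0

-- ===== PRECONDITION & SPEC =====
-- On the empty list A raises IndexError (heappop of an empty heap) and B raises ValueError
-- (min of an empty list); Pre_ excludes exactly that input.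
def Pre_solution (scoville : List Int) (K : Int) : Prop := scoville ≠ []
instance (scoville : List Int) (K : Int) : Decidable (Pre_solution scoville K) := by unfold Pre_solution; infer_instance
def pvWitness_solution : List Int × Int := ([1, 2, 3, 9, 10, 12], 7)

def Spec_solution (scoville : List Int) (K : Int) (out : Int) : Prop := out = solution_alt scoville K
instance (scoville : List Int) (K : Int) (out : Int) : Decidable (Spec_solution scoville K out) := by unfold Spec_solution; infer_instance

-- ===== CLAIM (what is proved, stated in full; the proofs are below) =====
def Claim_equal_solution : Prop := ∀ (scoville : List Int) (K : Int), Dom_solution scoville K → Pre_solution scoville K → Spec_solution scoville K (solution scoville K)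

-- ===== LEMMAS AND PROOFS =====

-- heap-order from index b on: every parent/child edge whose parent index is ≥ b holds
def HeapFrom (l : List Int) (b : Nat) : Prop :=
  ∀ j, 0 < j → j < l.length → b ≤ (j - 1) / 2 → hGet l ((j - 1) / 2) ≤ hGet l j

-- p lies in the subtree rooted at b
def InSub (b p : Nat) : Prop :=
  if p = b then True else if p < b then False else InSub b ((p - 1) / 2)
termination_by p
decreasing_by omega

theorem inSub_self (b : Nat) : InSub b b := by rw [InSub]; simp

theorem inSub_le {b p : Nat} (h : InSub b p) : b ≤ p := by
  rw [InSub] at h; split_ifs at h <;> omega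

theorem inSub_parent {b p : Nat} (h : InSub b p) (hlt : b < p) : InSub b ((p - 1) / 2) := by
  rw [InSub] at h; split_ifs at h <;> first | omega | exact h

theorem inSub_child1 {b p : Nat} (h : InSub b p) : InSub b (2 * p + 1) := by
  have hb := inSub_le h
  have e : (2 * p + 1 - 1) / 2 = p := by omega
  rw [InSub]
  split_ifs with h1 h2 <;> first | trivial | omega | rwa [e]

theorem inSub_child2 {b p : Nat} (h : InSub b p) : InSub b (2 * p + 2) := by
  have hb := inSub_le h
  have e : (2 * p + 2 - 1) / 2 = p := by omega
  rw [InSub]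
  split_ifs with h1 h2 <;> first | trivial | omega | rwa [e]

theorem inSub_zero (p : Nat) : InSub 0 p := by
  induction p using Nat.strong_induction_on with
  | _ p ih =>
    rw [InSub]
    split_ifs with h1 h2 <;> first | trivial | omega | exact ih _ (by omega)

theorem hGet_set_self {l : List Int} {i : Nat} (h : i < l.length) (a : Int) :
    hGet (l.set i a) i = a := by
  simp [hGet, List.getD_eq_getElem?_getD, List.getElem?_set_self h]

theorem hGet_set_ne {i j : Nat} (l : List Int) (a : Int) (h : i ≠ j) :
    hGet (l.set i a) j = hGet l j := by
  simp [hGet, List.getD_eq_getElem?_getD, List.getElem?_set_ne h]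

theorem hGet_eq_getElem {l : List Int} {i : Nat} (h : i < l.length) : hGet l i = l[i] :=
  List.getD_eq_getElem l 0 h

theorem perm_set_set (h : List Int) {p q : Nat} (hp : p < h.length) (hq : q < h.length)
    (hne : p ≠ q) (x : Int) : ((h.set p (hGet h q)).set q x).Perm (h.set p x) := by
  rw [List.perm_iff_count]
  intro a
  have hq' : q < (h.set p (hGet h q)).length := by simpa using hq
  rw [List.count_set hq', List.count_set hp, List.count_set hp]
  have hgq : (h.set p (hGet h q))[q] = h[q] := by
    rw [List.getElem_set_ne (h := hne)]
  rw [hgq, hGet_eq_getElem hq]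
  have hmp : h[p] ∈ h := List.getElem_mem hp
  have hmq : h[q] ∈ h := List.getElem_mem hq
  by_cases e1 : h[p] = a <;> by_cases e2 : h[q] = a <;>
    simp only [e1, e2, beq_iff_eq, reduceIte] <;>
    first
      | (have c1 : 0 < List.count a h := List.count_pos_iff.mpr (by rwa [e1] at hmp); omega)
      | (have c2 : 0 < List.count a h := List.count_pos_iff.mpr (by rwa [e2] at hmq); omega)
      | omega

-- the _siftdown loop: bubbling newitem up restores heap order from b on
theorem siftdownLoop_spec (newitem : Int) (p : Nat) : ∀ (h : List Int) (b : Nat),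
    p < h.length → InSub b p →
    (∀ j, 0 < j → j < h.length → b ≤ (j - 1) / 2 → j ≠ p →
      hGet (h.set p newitem) ((j - 1) / 2) ≤ hGet (h.set p newitem) j) →
    (b < p → ∀ c, c < h.length → (c = 2 * p + 1 ∨ c = 2 * p + 2) →
      hGet (h.set p newitem) ((p - 1) / 2) ≤ hGet (h.set p newitem) c) →
    ((siftdownLoop newitem h b p).1.set (siftdownLoop newitem h b p).2 newitem).length = h.length ∧
    ((siftdownLoop newitem h b p).1.set (siftdownLoop newitem h b p).2 newitem).Perm (h.set p newitem) ∧
    HeapFrom ((siftdownLoop newitem h b p).1.set (siftdownLoop newitem h b p).2 newitem) b := by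
  induction p using Nat.strong_induction_on with
  | _ p ih =>
    intro h b hp hsub inv1 inv2
    have Ev : ∀ k : Nat, hGet (h.set p newitem) k = if k = p then newitem else hGet h k := by
      intro k
      by_cases ek : k = p
      · subst ek; rw [if_pos rfl, hGet_set_self hp]
      · rw [if_neg ek, hGet_set_ne h newitem (fun hh => ek hh.symm)]
    rw [siftdownLoop]
    by_cases hbp : b < p
    · rw [if_pos hbp]
      have hp1 : 0 < p := by omega
      have hppp : (p - 1) / 2 < p := by omega
      have hppl : (p - 1) / 2 < h.length := by omega
      have hppne : (p - 1) / 2 ≠ p := by omega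
      by_cases hlt : newitem < hGet h ((p - 1) / 2)
      · rw [if_pos hlt]
        -- converted invariants, on h itself
        have inv1h : ∀ j, 0 < j → j < h.length → b ≤ (j - 1) / 2 → j ≠ p → (j - 1) / 2 ≠ p →
            hGet h ((j - 1) / 2) ≤ hGet h j := by
          intro j h0 h1 h2 h3 h4
          have := inv1 j h0 h1 h2 h3
          rwa [Ev, Ev, if_neg h4, if_neg h3] at this
        have inv1p : ∀ j, 0 < j → j < h.length → b ≤ (j - 1) / 2 → j ≠ p → (j - 1) / 2 = p →
            newitem ≤ hGet h j := by
          intro j h0 h1 h2 h3 h4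
          have := inv1 j h0 h1 h2 h3
          rwa [Ev, Ev, if_pos h4, if_neg h3] at this
        have inv2h : ∀ c, c < h.length → (c = 2 * p + 1 ∨ c = 2 * p + 2) →
            hGet h ((p - 1) / 2) ≤ hGet h c := by
          intro c hc hcc
          have := inv2 hbp c hc hcc
          rwa [Ev, Ev, if_neg hppne, if_neg (by omega)] at this
        -- pointwise description of the list passed to the recursive call
        have hppl' : (p - 1) / 2 < (h.set p (hGet h ((p - 1) / 2))).length := by
          simpa using hppl
        have Ev' : ∀ k : Nat,
            hGet ((h.set p (hGet h ((p - 1) / 2))).set ((p - 1) / 2) newitem) k =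
              if k = (p - 1) / 2 then newitem else if k = p then hGet h ((p - 1) / 2)
              else hGet h k := by
          intro k
          by_cases k1 : k = (p - 1) / 2
          · subst k1; rw [if_pos rfl, hGet_set_self hppl']
          · rw [if_neg k1, hGet_set_ne _ newitem (fun hh => k1 hh.symm)]
            by_cases k2 : k = p
            · subst k2; rw [if_pos rfl, hGet_set_self hp]
            · rw [if_neg k2, hGet_set_ne h _ (fun hh => k2 hh.symm)]
        have hsub' : InSub b ((p - 1) / 2) := inSub_parent hsub hbp
        obtain ⟨L, P, H⟩ := ih ((p - 1) / 2) hppp (h.set p (hGet h ((p - 1) / 2))) b hppl' hsub'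
          (by
            intro j hj0 hjl hbj hjne
            have hjl' : j < h.length := by simpa using hjl
            rw [Ev', Ev', if_neg hjne]
            by_cases ejp : j = p
            · subst ejp
              rw [if_pos rfl, if_pos rfl]
              exact le_of_lt hlt
            · rw [if_neg ejp]
              by_cases epj : (j - 1) / 2 = p
              · rw [if_neg (by omega), if_pos epj]
                exact inv2h j hjl' (by omega)
              · by_cases ejpp : (j - 1) / 2 = (p - 1) / 2
                · rw [if_pos ejpp]
                  refine le_trans (le_of_lt hlt) ?_
                  rw [← ejpp]
                  exact inv1h j hj0 hjl' hbj ejp epj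
                · rw [if_neg ejpp, if_neg epj]
                  exact inv1h j hj0 hjl' hbj ejp epj)
          (by
            intro hbpp c hcl hcc
            have hcl' : c < h.length := by simpa using hcl
            have hpp1 : 0 < (p - 1) / 2 := by omega
            have hbgp : b ≤ ((p - 1) / 2 - 1) / 2 := inSub_le (inSub_parent hsub' hbpp)
            have hgpne : ((p - 1) / 2 - 1) / 2 ≠ p := by omega
            have hgppp : ((p - 1) / 2 - 1) / 2 ≠ (p - 1) / 2 := by omega
            have step1 : hGet h (((p - 1) / 2 - 1) / 2) ≤ hGet h ((p - 1) / 2) :=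
              inv1h ((p - 1) / 2) hpp1 hppl hbgp hppne hgpne
            rw [Ev', Ev', if_neg hgppp, if_neg hgpne]
            by_cases ecp : c = p
            · subst ecp
              rw [if_neg hppne.symm, if_pos rfl]
              exact step1
            · rw [if_neg (by omega), if_neg ecp]
              have hcpp : (c - 1) / 2 = (p - 1) / 2 := by omega
              exact le_trans step1
                (by rw [← hcpp]; exact inv1h c (by omega) hcl' (by omega) ecp (by omega)))
        refine ⟨by simpa using L, P.trans (perm_set_set h hp hppl hppne.symm newitem), H⟩
      · rw [if_neg hlt]
        refine ⟨by simp, List.Perm.refl _, ?_⟩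
        intro j hj0 hjl hbj
        have hjl' : j < h.length := by simpa using hjl
        by_cases ejp : j = p
        · subst ejp
          rw [Ev, Ev, if_neg hppne, if_pos rfl]
          exact not_lt.mp hlt
        · exact inv1 j hj0 hjl' hbj ejp
    · rw [if_neg hbp]
      have hpb : p = b := by have := inSub_le hsub; omega
      refine ⟨by simp, List.Perm.refl _, ?_⟩
      intro j hj0 hjl hbj
      have hjl' : j < h.length := by simpa using hjl
      by_cases ejp : j = p
      · subst ejp; omega
      · exact inv1 j hj0 hjl' hbj ejp

theorem siftdown_spec (h : List Int) (b p : Nat) (hp : p < h.length) (hs : InSub b p)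
    (inv1 : ∀ j, 0 < j → j < h.length → b ≤ (j - 1) / 2 → j ≠ p →
      hGet h ((j - 1) / 2) ≤ hGet h j)
    (inv2 : b < p → ∀ c, c < h.length → (c = 2 * p + 1 ∨ c = 2 * p + 2) →
      hGet h ((p - 1) / 2) ≤ hGet h c) :
    (siftdown h b p).length = h.length ∧ (siftdown h b p).Perm h ∧ HeapFrom (siftdown h b p) b := by
  have e : h.set p (hGet h p) = h := by
    rw [hGet_eq_getElem hp]; exact List.set_getElem_self hp
  obtain ⟨L, P, H⟩ := siftdownLoop_spec (hGet h p) p h b hp hs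
    (by intro j a1 a2 a3 a4; rw [e]; exact inv1 j a1 a2 a3 a4)
    (by intro a1 c a2 a3; rw [e]; exact inv2 a1 c a2 a3)
  rw [e] at P
  simp only [siftdown]
  exact ⟨L, P, H⟩

-- one step of the _siftup loop: moving the chosen child cpos up preserves the invariant
theorem siftupLoop_step (newitem : Int) (k : Nat) (h : List Int) (p b cpos : Nat)
    (ih : ∀ (h : List Int) (p b : Nat),
      h.length - p ≤ k → p < h.length → InSub b p →
      (∀ j, 0 < j → j < h.length → b ≤ (j - 1) / 2 → j ≠ p → (j - 1) / 2 ≠ p →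
        hGet (h.set p newitem) ((j - 1) / 2) ≤ hGet (h.set p newitem) j) →
      (b < p → ∀ c, c < h.length → (c = 2 * p + 1 ∨ c = 2 * p + 2) →
        hGet (h.set p newitem) ((p - 1) / 2) ≤ hGet (h.set p newitem) c) →
      ((siftupLoop h p).1.set (siftupLoop h p).2 newitem).length = h.length ∧
      ((siftupLoop h p).1.set (siftupLoop h p).2 newitem).Perm (h.set p newitem) ∧
      (siftupLoop h p).2 < h.length ∧ ¬ (2 * (siftupLoop h p).2 + 1 < h.length) ∧
      InSub b (siftupLoop h p).2 ∧
      (∀ j, 0 < j → j < h.length → b ≤ (j - 1) / 2 → j ≠ (siftupLoop h p).2 →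
        hGet ((siftupLoop h p).1.set (siftupLoop h p).2 newitem) ((j - 1) / 2) ≤
          hGet ((siftupLoop h p).1.set (siftupLoop h p).2 newitem) j))
    (hk : h.length - cpos ≤ k) (hp : p < h.length) (hsub : InSub b p)
    (inv1 : ∀ j, 0 < j → j < h.length → b ≤ (j - 1) / 2 → j ≠ p → (j - 1) / 2 ≠ p →
      hGet (h.set p newitem) ((j - 1) / 2) ≤ hGet (h.set p newitem) j)
    (invC : b < p → ∀ c, c < h.length → (c = 2 * p + 1 ∨ c = 2 * p + 2) →
      hGet (h.set p newitem) ((p - 1) / 2) ≤ hGet (h.set p newitem) c)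
    (hc : 2 * p + 1 < h.length) (hcp : cpos = 2 * p + 1 ∨ cpos = 2 * p + 2)
    (hcl : cpos < h.length)
    (hmin1 : hGet h cpos ≤ hGet h (2 * p + 1))
    (hmin2 : 2 * p + 2 < h.length → hGet h cpos ≤ hGet h (2 * p + 2)) :
    ((siftupLoop (h.set p (hGet h cpos)) cpos).1.set
        (siftupLoop (h.set p (hGet h cpos)) cpos).2 newitem).length = h.length ∧
    ((siftupLoop (h.set p (hGet h cpos)) cpos).1.set
        (siftupLoop (h.set p (hGet h cpos)) cpos).2 newitem).Perm (h.set p newitem) ∧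
    (siftupLoop (h.set p (hGet h cpos)) cpos).2 < h.length ∧
    ¬ (2 * (siftupLoop (h.set p (hGet h cpos)) cpos).2 + 1 < h.length) ∧
    InSub b (siftupLoop (h.set p (hGet h cpos)) cpos).2 ∧
    (∀ j, 0 < j → j < h.length → b ≤ (j - 1) / 2 →
      j ≠ (siftupLoop (h.set p (hGet h cpos)) cpos).2 →
      hGet ((siftupLoop (h.set p (hGet h cpos)) cpos).1.set
          (siftupLoop (h.set p (hGet h cpos)) cpos).2 newitem) ((j - 1) / 2) ≤
        hGet ((siftupLoop (h.set p (hGet h cpos)) cpos).1.set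
          (siftupLoop (h.set p (hGet h cpos)) cpos).2 newitem) j) := by
  have hbp : b ≤ p := inSub_le hsub
  have hpc : p ≠ cpos := by omega
  have Ev : ∀ m : Nat, hGet (h.set p newitem) m = if m = p then newitem else hGet h m := by
    intro m
    by_cases em : m = p
    · subst em; rw [if_pos rfl, hGet_set_self hp]
    · rw [if_neg em, hGet_set_ne h newitem (fun hh => em hh.symm)]
  have inv1h : ∀ j, 0 < j → j < h.length → b ≤ (j - 1) / 2 → j ≠ p → (j - 1) / 2 ≠ p →
      hGet h ((j - 1) / 2) ≤ hGet h j := by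
    intro j h0 h1 h2 h3 h4
    have := inv1 j h0 h1 h2 h3 h4
    rwa [Ev, Ev, if_neg h4, if_neg h3] at this
  have invCh : b < p → ∀ c, c < h.length → (c = 2 * p + 1 ∨ c = 2 * p + 2) →
      hGet h ((p - 1) / 2) ≤ hGet h c := by
    intro hb c hcx hcc
    have := invC hb c hcx hcc
    rwa [Ev, Ev, if_neg (by omega), if_neg (by omega)] at this
  have hcl' : cpos < (h.set p (hGet h cpos)).length := by simpa using hcl
  have Ev' : ∀ m : Nat,
      hGet ((h.set p (hGet h cpos)).set cpos newitem) m =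
        if m = cpos then newitem else if m = p then hGet h cpos else hGet h m := by
    intro m
    by_cases m1 : m = cpos
    · subst m1; rw [if_pos rfl, hGet_set_self hcl']
    · rw [if_neg m1, hGet_set_ne _ newitem (fun hh => m1 hh.symm)]
      by_cases m2 : m = p
      · subst m2; rw [if_pos rfl, hGet_set_self hp]
      · rw [if_neg m2, hGet_set_ne h _ (fun hh => m2 hh.symm)]
  have hsub' : InSub b cpos := by
    rcases hcp with e | e <;> subst e
    · exact inSub_child1 hsub
    · exact inSub_child2 hsub
  obtain ⟨L, P, R1, R2, R3, R4⟩ := ih (h.set p (hGet h cpos)) cpos b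
    (by simpa using hk) hcl' hsub'
    (by
      intro j hj0 hjl hbj hjne hpjne
      have hjl' : j < h.length := by simpa using hjl
      rw [Ev', Ev', if_neg hjne, if_neg hpjne]
      by_cases ejp : j = p
      · subst ejp
        rw [if_pos rfl, if_neg (by omega)]
        exact invCh (by omega) cpos hcl hcp
      · rw [if_neg ejp]
        by_cases epj : (j - 1) / 2 = p
        · rw [if_pos epj]
          have hj12 : j = 2 * p + 1 ∨ j = 2 * p + 2 := by omega
          rcases hj12 with e | e <;> subst e
          · exact hmin1
          · exact hmin2 hjl'
        · rw [if_neg epj]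
          exact inv1h j hj0 hjl' hbj ejp epj)
    (by
      intro _ gc hgcl hgcc
      have hgcl' : gc < h.length := by simpa using hgcl
      have hcpp : (cpos - 1) / 2 = p := by omega
      rw [Ev', Ev', hcpp, if_neg hpc, if_pos rfl, if_neg (by omega), if_neg (by omega)]
      have := inv1h gc (by omega) hgcl' (by omega) (by omega) (by omega)
      rwa [show (gc - 1) / 2 = cpos by omega] at this)
  refine ⟨by simpa using L, P.trans (perm_set_set h hp hcl hpc newitem), by simpa using R1,
    by simpa using R2, R3, ?_⟩
  intro j h0 h1 h2 h3
  exact R4 j h0 (by simpa using h1) h2 h3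

-- the _siftup loop: the hole travels to a leaf, smaller children moving up
theorem siftupLoop_spec (newitem : Int) : ∀ (k : Nat) (h : List Int) (p b : Nat),
    h.length - p ≤ k → p < h.length → InSub b p →
    (∀ j, 0 < j → j < h.length → b ≤ (j - 1) / 2 → j ≠ p → (j - 1) / 2 ≠ p →
      hGet (h.set p newitem) ((j - 1) / 2) ≤ hGet (h.set p newitem) j) →
    (b < p → ∀ c, c < h.length → (c = 2 * p + 1 ∨ c = 2 * p + 2) →
      hGet (h.set p newitem) ((p - 1) / 2) ≤ hGet (h.set p newitem) c) →
    ((siftupLoop h p).1.set (siftupLoop h p).2 newitem).length = h.length ∧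
    ((siftupLoop h p).1.set (siftupLoop h p).2 newitem).Perm (h.set p newitem) ∧
    (siftupLoop h p).2 < h.length ∧ ¬ (2 * (siftupLoop h p).2 + 1 < h.length) ∧
    InSub b (siftupLoop h p).2 ∧
    (∀ j, 0 < j → j < h.length → b ≤ (j - 1) / 2 → j ≠ (siftupLoop h p).2 →
      hGet ((siftupLoop h p).1.set (siftupLoop h p).2 newitem) ((j - 1) / 2) ≤
        hGet ((siftupLoop h p).1.set (siftupLoop h p).2 newitem) j) := by
  intro k
  induction k with
  | zero => intro h p b hk hp _ _ _; omega
  | succ k ih =>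
    intro h p b hk hp hsub inv1 invC
    rw [siftupLoop]
    simp only []
    by_cases hc : 2 * p + 1 < h.length
    · rw [dif_pos hc]
      by_cases hcond : 2 * p + 1 + 1 < h.length ∧ ¬ hGet h (2 * p + 1) < hGet h (2 * p + 1 + 1)
      · rw [if_pos hcond]
        exact siftupLoop_step newitem k h p b (2 * p + 1 + 1) ih (by omega) hp hsub inv1 invC
          hc (by omega) hcond.1 (not_lt.mp hcond.2)
          (by intro _; rw [show (2 * p + 1 + 1 : Nat) = 2 * p + 2 from by omega])
      · rw [if_neg hcond]
        have hmin2 : 2 * p + 2 < h.length → hGet h (2 * p + 1) ≤ hGet h (2 * p + 2) := by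
          intro h2
          rcases not_and_or.mp hcond with hh | hh
          · omega
          · have hlt := not_not.mp hh
            have e : 2 * p + 1 + 1 = 2 * p + 2 := by omega
            rw [e] at hlt
            exact le_of_lt hlt
        exact siftupLoop_step newitem k h p b (2 * p + 1) ih (by omega) hp hsub inv1 invC
          hc (by omega) hc (le_refl _) hmin2
    · rw [dif_neg hc]
      refine ⟨by simp, List.Perm.refl _, hp, hc, hsub, ?_⟩
      intro j h0 h1 h2 h3
      exact inv1 j h0 h1 h2 h3 (by omega)

theorem siftup_spec (h : List Int) (p : Nat) (hp : p < h.length) (hf : HeapFrom h (p + 1)) :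
    (siftup h p).length = h.length ∧ (siftup h p).Perm h ∧ HeapFrom (siftup h p) p := by
  have e : h.set p (hGet h p) = h := by
    rw [hGet_eq_getElem hp]; exact List.set_getElem_self hp
  obtain ⟨L, P, R1, R2, R3, R4⟩ := siftupLoop_spec (hGet h p) h.length h p p (by omega) hp
    (inSub_self p)
    (by intro j h0 h1 h2 _ h4; rw [e]; exact hf j h0 h1 (by omega))
    (fun hh => absurd hh (lt_irrefl p))
  rw [e] at P
  obtain ⟨L2, P2, H2⟩ := siftdown_spec
    ((siftupLoop h p).1.set (siftupLoop h p).2 (hGet h p)) p (siftupLoop h p).2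
    (by rw [L]; exact R1) R3
    (by intro j h0 h1 h2 h3; exact R4 j h0 (by rwa [L] at h1) h2 h3)
    (by intro _ c hcl hcc; rw [L] at hcl; omega)
  simp only [siftup]
  exact ⟨L2.trans L, P2.trans P, H2⟩

theorem heapFrom_half (l : List Int) : HeapFrom l (l.length / 2) := by
  intro j hj hjl hb; omega

theorem heapify_fold : ∀ (k : Nat) (l : List Int), 2 * k ≤ l.length → HeapFrom l k →
    ((List.range k).reverse.foldl (fun h i => siftup h i) l).length = l.length ∧
    ((List.range k).reverse.foldl (fun h i => siftup h i) l).Perm l ∧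
    HeapFrom ((List.range k).reverse.foldl (fun h i => siftup h i) l) 0 := by
  intro k
  induction k with
  | zero =>
    intro l _ hf
    exact ⟨rfl, List.Perm.refl l, hf⟩
  | succ k ih =>
    intro l hk hf
    rw [List.range_succ, List.reverse_append]
    simp only [List.reverse_singleton, List.singleton_append, List.foldl_cons]
    obtain ⟨L1, P1, H1⟩ := siftup_spec l k (by omega) hf
    obtain ⟨L2, P2, H2⟩ := ih (siftup l k) (by rw [L1]; omega) H1
    exact ⟨L2.trans L1, P2.trans P1, H2⟩

theorem heapify_spec (l : List Int) :
    (heapify l).length = l.length ∧ (heapify l).Perm l ∧ HeapFrom (heapify l) 0 := by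
  simpa [heapify] using heapify_fold (l.length / 2) l (by omega) (heapFrom_half l)

theorem hGet_dropLast {l : List Int} {j : Nat} (hj : j < l.length - 1) :
    hGet l.dropLast j = hGet l j := by
  simp [hGet, List.getD_eq_getElem?_getD, List.getElem?_dropLast, if_pos hj]

theorem hGet_append {l : List Int} {j : Nat} (x : Int) (hj : j < l.length) :
    hGet (l ++ [x]) j = hGet l j := by
  simp [hGet, List.getD_eq_getElem?_getD, List.getElem?_append_left hj]

theorem root_min {l : List Int} (hf : HeapFrom l 0) : ∀ j, j < l.length → hGet l 0 ≤ hGet l j := by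
  intro j
  induction j using Nat.strong_induction_on with
  | _ j ih =>
    intro hj
    rcases Nat.eq_zero_or_pos j with h0 | h0
    · subst h0; exact le_refl _
    · exact le_trans (ih ((j - 1) / 2) (by omega) (by omega)) (hf j h0 hj (by omega))

theorem heappop_spec (h : List Int) (hne : h ≠ []) (hf : HeapFrom h 0) :
    (heappop h).1 ∈ h ∧ (∀ y ∈ h, (heappop h).1 ≤ y) ∧
    h.Perm ((heappop h).1 :: (heappop h).2) ∧ HeapFrom (heappop h).2 0 ∧
    (heappop h).2.length + 1 = h.length := by
  have hdc : h.dropLast ++ [h.getLast hne] = h := List.dropLast_concat_getLast hne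
  have hlastD : h.getLastD 0 = h.getLast hne := by
    rw [List.getLastD_eq_getLast?, List.getLast?_eq_getLast hne, Option.getD_some]
  have hmin : ∀ y ∈ h, hGet h 0 ≤ y := by
    intro y hy
    obtain ⟨i, hi, rfl⟩ := List.mem_iff_getElem.mp hy
    rw [← hGet_eq_getElem hi]
    exact root_min hf i hi
  have hlen0 : 0 < h.length := List.length_pos_iff.mpr hne
  have hmem : hGet h 0 ∈ h := by
    rw [hGet_eq_getElem hlen0]; exact List.getElem_mem hlen0
  simp only [heappop]
  by_cases he : h.dropLast.isEmpty
  · rw [if_pos he]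
    obtain ⟨a, hh⟩ : ∃ a, h = [a] := by
      have hlen1 := List.length_dropLast (xs := h)
      rw [List.isEmpty_iff.mp he] at hlen1
      simp only [List.length_nil] at hlen1
      cases h with
      | nil => exact absurd rfl hne
      | cons a t =>
        simp only [List.length_cons] at hlen1
        have ht : t = [] := List.length_eq_zero_iff.mp (by omega)
        exact ⟨a, by rw [ht]⟩
    subst hh
    have e1 : ([a] : List Int).getLastD 0 = a := by simp
    have e2 : ([a] : List Int).dropLast = [] := rfl
    rw [e1, e2]
    refine ⟨List.mem_singleton.mpr rfl, ?_, ?_, ?_, by simp⟩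
    · intro y hy; rw [List.mem_singleton.mp hy]
    · exact List.Perm.refl _
    · intro j _ hjl _; simp at hjl
  · rw [if_neg he]
    obtain ⟨r0, t, hrest⟩ : ∃ r0 t, h.dropLast = r0 :: t := by
      cases hr : h.dropLast with
      | nil => rw [hr] at he; simp at he
      | cons a b => exact ⟨a, b, rfl⟩
    have hlen : h.dropLast.length + 1 = h.length := by
      conv_rhs => rw [← hdc]
      simp
    have hlen2 : 2 ≤ h.length := by rw [← hlen, hrest]; simp
    have hget0 : hGet h.dropLast 0 = hGet h 0 := hGet_dropLast (by omega)
    have hH1 : HeapFrom (h.dropLast.set 0 (h.getLastD 0)) (0 + 1) := by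
      intro j hj0 hjl hbj
      rw [List.length_set] at hjl
      rw [hGet_set_ne _ _ (by omega), hGet_set_ne _ _ (by omega),
        hGet_dropLast (by omega), hGet_dropLast (by omega)]
      exact hf j hj0 (by omega) (by omega)
    obtain ⟨L, P, H⟩ := siftup_spec (h.dropLast.set 0 (h.getLastD 0)) 0
      (by rw [List.length_set, hrest]; simp) hH1
    have hl' : h.dropLast.set 0 (h.getLastD 0) = h.getLast hne :: t := by
      rw [hrest, hlastD, List.set_cons_zero]
    have hr0 : hGet h.dropLast 0 = r0 := by rw [hrest]; rfl
    refine ⟨?_, ?_, ?_, H, ?_⟩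
    · rw [hget0]; exact hmem
    · intro y hy; rw [hget0]; exact hmin y hy
    · have p1 : h.Perm (h.getLast hne :: h.dropLast) := by
        conv_lhs => rw [← hdc]
        exact List.perm_append_singleton _ _
      have p2 : (h.getLast hne :: h.dropLast).Perm (r0 :: h.getLast hne :: t) := by
        rw [hrest]; exact List.Perm.swap _ _ _
      have p3 : (h.getLast hne :: t).Perm (siftup (h.dropLast.set 0 (h.getLastD 0)) 0) := by
        rw [← hl']; exact P.symm
      rw [hr0]
      exact (p1.trans p2).trans (p3.cons r0)
    · rw [L, List.length_set]; exact hlen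

theorem heappush_spec (h : List Int) (x : Int) (hf : HeapFrom h 0) :
    (heappush h x).length = h.length + 1 ∧ (heappush h x).Perm (x :: h) ∧
    HeapFrom (heappush h x) 0 := by
  have hp : h.length < (h ++ [x]).length := by simp
  obtain ⟨L, P, H⟩ := siftdown_spec (h ++ [x]) 0 h.length hp (inSub_zero _)
    (by
      intro j hj0 hjl hbj hjne
      have hjl' : j < h.length := by
        simp only [List.length_append, List.length_cons, List.length_nil] at hjl
        omega
      rw [hGet_append x (show (j - 1) / 2 < h.length by omega), hGet_append x (by omega)]
      exact hf j hj0 hjl' (by omega))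
    (by
      intro h0 c hcl hcc
      simp only [List.length_append, List.length_cons, List.length_nil] at hcl
      omega)
  refine ⟨by simpa using L, P.trans (List.perm_append_singleton _ _), H⟩

theorem minD_spec (s : List Int) (hne : s ≠ []) :
    (PySem.List.min? s (fun x => x)).getD 0 ∈ s ∧
    ∀ y ∈ s, (PySem.List.min? s (fun x => x)).getD 0 ≤ y := by
  cases hm : PySem.List.min? s (fun x => x) with
  | none => exact absurd ((PySem.List.min?_eq_none_iff s _).mp hm) hne
  | some m =>
    refine ⟨by simpa using PySem.List.min?_mem hm, fun y hy => by
      simpa using PySem.List.min?_isMin hm y hy⟩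

theorem loop_eq (K : Int) : ∀ (fuel : Nat) (h s : List Int) (c : Int),
    HeapFrom h 0 → h.Perm s → s ≠ [] →
    solutionLoopA K fuel h c = solutionLoopB K fuel s c := by
  intro fuel
  induction fuel with
  | zero => intro h s c _ _ _; rfl
  | succ f ih =>
    intro h s c hH hP hs
    have hne : h ≠ [] := by
      intro e; subst e; exact hs (List.nil_perm.mp hP)
    obtain ⟨hx_mem, hx_min, hx_perm, hH', hlen'⟩ := heappop_spec h hne hH
    obtain ⟨hm_mem, hm_min⟩ := minD_spec s hs
    have hxm : (heappop h).1 = (PySem.List.min? s (fun x => x)).getD 0 :=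
      le_antisymm (hx_min _ (hP.mem_iff.mpr hm_mem)) (hm_min _ (hP.mem_iff.mp hx_mem))
    have hlens : h.length = s.length := hP.length_eq
    simp only [solutionLoopA, solutionLoopB]
    rw [hxm]
    by_cases hK : (PySem.List.min? s (fun x => x)).getD 0 ≥ K
    · rw [if_pos hK, if_pos hK]
    · rw [if_neg hK, if_neg hK]
      by_cases h1 : (heappop h).2.length = 0
      · rw [if_pos h1, if_pos (by omega)]
      · rw [if_neg h1, if_neg (show ¬ s.length < 2 by omega)]
        have hrem1 : (PySem.List.remove? s ((PySem.List.min? s (fun x => x)).getD 0)).getD [] =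
            s.erase ((PySem.List.min? s (fun x => x)).getD 0) := by
          rw [PySem.List.remove?_eq_some_erase s _ hm_mem]; rfl
        rw [hrem1]
        have hperm1 : (heappop h).2.Perm (s.erase ((PySem.List.min? s (fun x => x)).getD 0)) := by
          have e : ((heappop h).1 :: (heappop h).2).erase (heappop h).1 = (heappop h).2 :=
            List.erase_cons_head _ _
          have hp2 : (s.erase (heappop h).1).Perm (((heappop h).1 :: (heappop h).2).erase (heappop h).1) :=
            (hP.symm.trans hx_perm).erase _
          rw [e] at hp2
          rw [← hxm]
          exact hp2.symm
        have hs1len : (s.erase ((PySem.List.min? s (fun x => x)).getD 0)).length + 1 = s.length := by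
          rw [List.length_erase_of_mem hm_mem]; omega
        have hs1ne : s.erase ((PySem.List.min? s (fun x => x)).getD 0) ≠ [] := by
          intro e; rw [e] at hs1len; simp at hs1len; omega
        have hne2 : (heappop h).2 ≠ [] := by
          intro e; exact h1 (by rw [e]; rfl)
        obtain ⟨hy_mem, hy_min, hy_perm, hH'', hlen''⟩ := heappop_spec (heappop h).2 hne2 hH'
        obtain ⟨hm2_mem, hm2_min⟩ := minD_spec _ hs1ne
        have hym : (heappop (heappop h).2).1 =
            (PySem.List.min? (s.erase ((PySem.List.min? s (fun x => x)).getD 0)) (fun x => x)).getD 0 :=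
          le_antisymm (hy_min _ (hperm1.mem_iff.mpr hm2_mem)) (hm2_min _ (hperm1.mem_iff.mp hy_mem))
        have hrem2 : (PySem.List.remove? (s.erase ((PySem.List.min? s (fun x => x)).getD 0))
            ((PySem.List.min? (s.erase ((PySem.List.min? s (fun x => x)).getD 0)) (fun x => x)).getD 0)).getD [] =
            (s.erase ((PySem.List.min? s (fun x => x)).getD 0)).erase
              ((PySem.List.min? (s.erase ((PySem.List.min? s (fun x => x)).getD 0)) (fun x => x)).getD 0) := by
          rw [PySem.List.remove?_eq_some_erase _ _ hm2_mem]; rfl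
        rw [hrem2, hym]
        have hperm2 : (heappop (heappop h).2).2.Perm
            ((s.erase ((PySem.List.min? s (fun x => x)).getD 0)).erase
              ((PySem.List.min? (s.erase ((PySem.List.min? s (fun x => x)).getD 0)) (fun x => x)).getD 0)) := by
          have e : ((heappop (heappop h).2).1 :: (heappop (heappop h).2).2).erase (heappop (heappop h).2).1 =
              (heappop (heappop h).2).2 := List.erase_cons_head _ _
          have hp2 : ((s.erase ((PySem.List.min? s (fun x => x)).getD 0)).erase (heappop (heappop h).2).1).Perm
              (((heappop (heappop h).2).1 :: (heappop (heappop h).2).2).erase (heappop (heappop h).2).1) :=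
            (hperm1.symm.trans hy_perm).erase _
          rw [e] at hp2
          rw [← hym]
          exact hp2.symm
        obtain ⟨hpL, hpP, hpH⟩ := heappush_spec (heappop (heappop h).2).2
          ((PySem.List.min? s (fun x => x)).getD 0 +
            (PySem.List.min? (s.erase ((PySem.List.min? s (fun x => x)).getD 0)) (fun x => x)).getD 0 * 2) hH''
        exact ih _ _ (c + 1) hpH
          (hpP.trans ((hperm2.cons _).trans (List.perm_append_singleton _ _).symm))
          (by simp)

-- ===== VERDICT (by name: the statement is the Claim_ definition above) =====
theorem solution_spec : Claim_equal_solution := by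
  intro scoville K _hdom hpre
  unfold Spec_solution solution solution_alt
  obtain ⟨hlen, hperm, hheap⟩ := heapify_spec scoville
  rw [← hlen]
  exact loop_eq K _ _ _ 0 hheap hperm hpre
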